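-- pv_equiv track=rewrite | github.com/angsylvest/pathf-lstm | path_finding/cbs.py | is_conflict_free
-- ===== SOURCE A (Python) =====
-- def is_conflict_free(paths):
--     # Check if there are any conflicting positions for each agent
--     conflict_positions = {}
--
--     for agent1, path1 in paths.items():
--         agent_conflicts = set()
--
--         for pos in path1[1:-1]:  # Exclude the first and last position of the path (endpoint) (since these can't change)
--             # Check if pos appears in the path of another agent
--             for agent2, path2 in paths.items():
--                 if agent1 != agent2 and pos in path2[:-1]:  # Exclude the last position of the other path
--                     agent_conflicts.add(pos)
--
--         if agent_conflicts:
--             conflict_positions[agent1] = list(agent_conflicts)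
--
--         else:
--             conflict_positions[agent1] = []
--
--     conflict_free = all(not conflicts for conflicts in conflict_positions.values())
--     return conflict_positions, conflict_free
-- ===== SOURCE B (Python) =====
-- def is_conflict_free(paths):
--     # Count, once, how many agents visit each position before their endpoint.
--     owners = {}
--     for agent, path in paths.items():
--         for pos in set(path[:-1]):
--             owners[pos] = owners.get(pos, 0) + 1
--     conflict_positions = {}
--     conflict_free = True
--     for agent, path in paths.items():
--         conflicts = []
--         for pos in path[1:-1]:
--             if owners.get(pos, 0) > 1 and pos not in conflicts:
--                 conflicts.append(pos)
--         conflict_positions[agent] = conflicts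
--         conflict_free = conflict_free and not conflicts
--     return conflict_positions, conflict_free
-- ===== Notes on version B (the rewrite author's own statement) =====
-- stated objective: alternative
-- what changed: Instead of scanning every other agent's path for every interior position of every path (nested quadruple loop), B builds one position->owner-count index over all truncated paths and decides each interior position with a single dictionary lookup, collecting deduplicated conflicts in first-occurrence order.
import Mathlib
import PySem

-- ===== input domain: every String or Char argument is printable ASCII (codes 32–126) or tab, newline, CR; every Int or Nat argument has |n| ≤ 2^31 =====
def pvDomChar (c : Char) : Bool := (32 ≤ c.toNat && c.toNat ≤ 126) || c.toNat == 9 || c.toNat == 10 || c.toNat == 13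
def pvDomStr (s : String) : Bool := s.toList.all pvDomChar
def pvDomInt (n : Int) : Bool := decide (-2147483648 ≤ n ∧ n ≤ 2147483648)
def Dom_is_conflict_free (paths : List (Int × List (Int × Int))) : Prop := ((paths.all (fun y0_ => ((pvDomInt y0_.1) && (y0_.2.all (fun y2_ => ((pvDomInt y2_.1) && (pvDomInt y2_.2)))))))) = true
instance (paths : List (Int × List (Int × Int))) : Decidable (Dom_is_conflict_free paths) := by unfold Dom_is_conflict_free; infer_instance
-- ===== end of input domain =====

-- B replaces A's nested all-pairs scan by a single position -> owner-count index consulted per interior position (alternative algorithm).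

-- ===== PORT A =====
-- 'paths' is a Python dict: the association list is normalized to unique keys exactly as dict() does.
def is_conflict_free (paths : List (Int × List (Int × Int))) : (List (Int × List (Int × Int))) × Bool :=
  let d : PySem.Dict Int (List (Int × Int)) := PySem.Dict.ofList paths
  let conflict_positions : PySem.Dict Int (List (Int × Int)) :=
    d.items.foldl (fun cp ap =>
      let agent_conflicts : PySem.Set (Int × Int) :=
        (PySem.List.slice ap.2 (some 1) (some (-1))).foldl (fun ac pos =>
          d.items.foldl (fun ac bp =>
            if ap.1 ≠ bp.1 ∧ pos ∈ PySem.List.slice bp.2 none (some (-1)) then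
              PySem.Set.add ac pos
            else ac) ac)
          PySem.Set.empty
      if agent_conflicts ≠ [] then cp.insert ap.1 agent_conflicts
      else cp.insert ap.1 []) PySem.Dict.empty
  (conflict_positions.items, conflict_positions.values.all (fun c => c.isEmpty))

-- ===== PORT B =====
def is_conflict_free_alt (paths : List (Int × List (Int × Int))) : (List (Int × List (Int × Int))) × Bool :=
  let d : PySem.Dict Int (List (Int × Int)) := PySem.Dict.ofList paths
  let owners : PySem.Dict (Int × Int) Int :=
    d.items.foldl (fun o ap =>
      (PySem.Set.ofList (PySem.List.slice ap.2 none (some (-1)))).foldl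
        (fun o pos => o.insert pos (o.getD pos 0 + 1)) o) PySem.Dict.empty
  let st :=
    d.items.foldl (fun (st : PySem.Dict Int (List (Int × Int)) × Bool) ap =>
      let conflicts : List (Int × Int) :=
        (PySem.List.slice ap.2 (some 1) (some (-1))).foldl (fun cs pos =>
          if owners.getD pos 0 > 1 ∧ pos ∉ cs then cs ++ [pos] else cs) []
      (st.1.insert ap.1 conflicts, st.2 && conflicts.isEmpty)) (PySem.Dict.empty, true)
  (st.1.items, st.2)

-- ===== PRECONDITION & SPEC =====
-- Pre_ excludes inputs where some agent has two or more distinct conflicting positions, because there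
-- A returns list(set(...)) whose element order is CPython's accidental hash-iteration order.
def Pre_is_conflict_free (paths : List (Int × List (Int × Int))) : Prop :=
  ∀ ap ∈ (PySem.Dict.ofList paths : PySem.Dict Int (List (Int × Int))).items,
    (PySem.List.dedup ((PySem.List.slice ap.2 (some 1) (some (-1))).filter
      (fun pos => (PySem.Dict.ofList paths : PySem.Dict Int (List (Int × Int))).items.any
        (fun bp => decide (ap.1 ≠ bp.1 ∧ pos ∈ PySem.List.slice bp.2 none (some (-1))))))).length ≤ 1
instance (paths : List (Int × List (Int × Int))) : Decidable (Pre_is_conflict_free paths) := by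
  unfold Pre_is_conflict_free; infer_instance

def pvWitness_is_conflict_free : (List (Int × List (Int × Int))) :=
  [(0, [(0, 0), (1, 1), (2, 2)]), (1, [(1, 1), (3, 3)])]

def Spec_is_conflict_free (paths : List (Int × List (Int × Int))) (out : (List (Int × List (Int × Int))) × Bool) : Prop := out = is_conflict_free_alt paths
instance (paths : List (Int × List (Int × Int))) (out : (List (Int × List (Int × Int))) × Bool) : Decidable (Spec_is_conflict_free paths out) := by unfold Spec_is_conflict_free; infer_instance

-- ===== CLAIM (what is proved, stated in full; the proofs are below) =====
def Claim_equal_is_conflict_free : Prop := ∀ (paths : List (Int × List (Int × Int))), Dom_is_conflict_free paths → Pre_is_conflict_free paths → Spec_is_conflict_free paths (is_conflict_free paths)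

-- ===== LEMMAS AND PROOFS =====

-- A's per-agent conflict set, written as a filter of the interior of the path
def pvConfA (items : List (Int × List (Int × Int))) (ap : Int × List (Int × Int)) : List (Int × Int) :=
  PySem.Set.ofList ((PySem.List.slice ap.2 (some 1) (some (-1))).filter
    (fun pos => items.any (fun bp => decide (ap.1 ≠ bp.1 ∧ pos ∈ PySem.List.slice bp.2 none (some (-1))))))

-- B's per-agent conflict list, written as a filter of the interior of the path
def pvConfB (items : List (Int × List (Int × Int))) (ap : Int × List (Int × Int)) : List (Int × Int) :=
  PySem.Set.ofList ((PySem.List.slice ap.2 (some 1) (some (-1))).filter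
    (fun pos => decide (1 < items.countP (fun bp => decide (pos ∈ PySem.List.slice bp.2 none (some (-1)))))))

-- xs[1:-1] as drop/dropLast
theorem pv_slice_one_neg_one (xs : List (Int × Int)) :
    PySem.List.slice xs (some 1) (some (-1)) = xs.dropLast.drop 1 := by
  simp [PySem.List.slice]
  cases xs with
  | nil => simp
  | cons x t => simp [List.dropLast_eq_take, ← List.drop_one, List.drop_take]

-- A's inner scan over all agents collapses to a single conditional add
theorem pv_foldl_any (items : List (Int × List (Int × Int))) (a1 : Int)
    (ac : PySem.Set (Int × Int)) (pos : Int × Int) :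
    items.foldl (fun ac bp =>
        if a1 ≠ bp.1 ∧ pos ∈ PySem.List.slice bp.2 none (some (-1)) then PySem.Set.add ac pos else ac) ac
      = if items.any (fun bp => decide (a1 ≠ bp.1 ∧ pos ∈ PySem.List.slice bp.2 none (some (-1)))) then
          PySem.Set.add ac pos
        else ac := by
  induction items generalizing ac with
  | nil => simp
  | cons bp t ih =>
      rw [List.foldl_cons, List.any_cons]
      by_cases h : a1 ≠ bp.1 ∧ pos ∈ PySem.List.slice bp.2 none (some (-1))
      · rw [if_pos h, ih, decide_eq_true h]
        simp
      · rw [if_neg h, ih, decide_eq_false h, Bool.false_or]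

-- a conditional-add loop from the empty set is set(filter)
theorem pv_foldl_add_filter (l : List (Int × Int)) (p : (Int × Int) → Bool) :
    l.foldl (fun cs pos => if p pos then PySem.Set.add cs pos else cs) ([] : PySem.Set (Int × Int))
      = PySem.Set.ofList (l.filter p) := by
  rw [PySem.List.foldl_if_eq_foldl_filter]
  rfl

-- B's "not yet collected" append is exactly the conditional add
theorem pv_dedup_append (l : List (Int × Int)) (q : (Int × Int) → Prop) [DecidablePred q] :
    l.foldl (fun cs pos => if q pos ∧ pos ∉ cs then cs ++ [pos] else cs) ([] : List (Int × Int))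
      = l.foldl (fun cs pos => if q pos then PySem.Set.add cs pos else cs) ([] : PySem.Set (Int × Int)) := by
  have h : (fun (cs : List (Int × Int)) pos => if q pos ∧ pos ∉ cs then cs ++ [pos] else cs)
      = fun cs pos => if q pos then PySem.Set.add cs pos else cs := by
    funext cs pos
    by_cases hq : q pos
    · by_cases hm : pos ∈ cs <;> simp [hq, hm]
    · simp [hq]
  rw [h]

-- the owners index counts, for each position, the agents whose truncated path visits it
theorem pv_owners_getD (l : List (Int × List (Int × Int))) (o : PySem.Dict (Int × Int) Int)
    (pos : Int × Int) :
    (l.foldl (fun o ap =>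
        (PySem.Set.ofList (PySem.List.slice ap.2 none (some (-1)))).foldl
          (fun o pos => o.insert pos (o.getD pos 0 + 1)) o) o).getD pos 0
      = o.getD pos 0 + (l.countP (fun bp => decide (pos ∈ PySem.List.slice bp.2 none (some (-1)))) : Int) := by
  induction l generalizing o with
  | nil => simp
  | cons ap t ih =>
      rw [List.foldl_cons, ih, PySem.Dict.getD_foldl_insert_add_one, List.countP_cons]
      by_cases h : pos ∈ PySem.List.slice ap.2 none (some (-1))
      · rw [List.count_eq_one_of_mem (PySem.Set.nodup_ofList _) ((PySem.Set.mem_ofList _ _).mpr h)]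
        simp [h]; ring
      · rw [List.count_eq_zero_of_not_mem (fun hc => h ((PySem.Set.mem_ofList _ _).mp hc))]
        simp [h]

-- countP > 1 on a nodup list iff two distinct members satisfy the predicate
theorem pv_one_lt_countP (l : List (Int × List (Int × Int))) (p : (Int × List (Int × Int)) → Bool)
    (hn : l.Nodup) :
    1 < l.countP p ↔ ∃ a ∈ l, ∃ b ∈ l, a ≠ b ∧ p a ∧ p b := by
  constructor
  · intro h
    rw [List.countP_eq_length_filter, ← List.toFinset_card_of_nodup (hn.filter p)] at h
    obtain ⟨a, ha, b, hb, hab⟩ := Finset.one_lt_card.mp h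
    simp only [List.mem_toFinset, List.mem_filter] at ha hb
    exact ⟨a, ha.1, b, hb.1, hab, ha.2, hb.2⟩
  · rintro ⟨a, ha, b, hb, hab, hpa, hpb⟩
    rw [List.countP_eq_length_filter, ← List.toFinset_card_of_nodup (hn.filter p)]
    exact Finset.one_lt_card.mpr ⟨a, by simp [ha, hpa], b, by simp [hb, hpb], hab⟩

-- the O(1) owner-count test agrees with A's "some other agent visits pos" scan
theorem pv_test_iff (items : List (Int × List (Int × Int))) (hk : (items.map Prod.fst).Nodup)
    (ap : Int × List (Int × Int)) (hap : ap ∈ items) (pos : Int × Int)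
    (hpos : pos ∈ PySem.List.slice ap.2 none (some (-1))) :
    (1 < items.countP (fun bp => decide (pos ∈ PySem.List.slice bp.2 none (some (-1)))))
      ↔ (items.any (fun bp => decide (ap.1 ≠ bp.1 ∧ pos ∈ PySem.List.slice bp.2 none (some (-1))))) = true := by
  have hn : items.Nodup := hk.of_map
  rw [pv_one_lt_countP _ _ hn, List.any_eq_true]
  constructor
  · rintro ⟨a, ha, b, hb, hab, hpa, hpb⟩
    simp only [decide_eq_true_eq] at hpa hpb
    have key : ∃ c ∈ items, c ≠ ap ∧ pos ∈ PySem.List.slice c.2 none (some (-1)) := by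
      by_cases hAa : a = ap
      · exact ⟨b, hb, fun h => hab (hAa.trans h.symm), hpb⟩
      · exact ⟨a, ha, hAa, hpa⟩
    obtain ⟨c, hc, hcap, hpc⟩ := key
    refine ⟨c, hc, ?_⟩
    simp only [decide_eq_true_eq]
    exact ⟨fun h => hcap (List.inj_on_of_nodup_map hk hc hap h.symm), hpc⟩
  · rintro ⟨b, hb, hB⟩
    simp only [decide_eq_true_eq] at hB
    refine ⟨ap, hap, b, hb, fun h => hB.1 (congrArg Prod.fst h), by simpa using hpos, by simpa using hB.2⟩

-- two nodup lists with the same members, one of length at most 1, are equal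
theorem pv_eq_of_le_one (l1 l2 : List (Int × Int)) (h1 : l1.Nodup) (h2 : l2.Nodup)
    (hm : ∀ x, x ∈ l1 ↔ x ∈ l2) (hl : l1.length ≤ 1) : l1 = l2 := by
  match l1, h1 with
  | [], _ =>
      cases l2 with
      | nil => rfl
      | cons b t => exact absurd ((hm b).mpr List.mem_cons_self) (List.not_mem_nil)
  | [a], _ =>
      cases l2 with
      | nil => exact absurd ((hm a).mp (List.mem_singleton_self a)) (List.not_mem_nil)
      | cons b t =>
          have hb : b = a := by
            have := (hm b).mpr List.mem_cons_self
            simpa using this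
          subst hb
          have ht : t = [] := by
            cases t with
            | nil => rfl
            | cons c u =>
                have hc : c = b := by
                  have := (hm c).mpr (List.mem_cons_of_mem b List.mem_cons_self)
                  simpa using this
                subst hc
                exact absurd h2 (by simp)
          rw [ht]
  | a :: b :: t, _ => simp at hl

-- the two per-agent conflict lists have the same members
theorem pv_conf_mem_iff (items : List (Int × List (Int × Int))) (hk : (items.map Prod.fst).Nodup)
    (ap : Int × List (Int × Int)) (hap : ap ∈ items) (x : Int × Int) :
    x ∈ pvConfA items ap ↔ x ∈ pvConfB items ap := by
  unfold pvConfA pvConfB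
  rw [PySem.Set.mem_ofList, PySem.Set.mem_ofList, List.mem_filter, List.mem_filter]
  constructor
  · rintro ⟨hx, hpx⟩
    refine ⟨hx, ?_⟩
    have hmem : x ∈ PySem.List.slice ap.2 none (some (-1)) := by
      rw [pv_slice_one_neg_one] at hx
      rw [PySem.List.slice_to_neg_one]
      exact List.mem_of_mem_drop hx
    simpa using (pv_test_iff items hk ap hap x hmem).mpr hpx
  · rintro ⟨hx, hpx⟩
    refine ⟨hx, ?_⟩
    have hmem : x ∈ PySem.List.slice ap.2 none (some (-1)) := by
      rw [pv_slice_one_neg_one] at hx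
      rw [PySem.List.slice_to_neg_one]
      exact List.mem_of_mem_drop hx
    exact (pv_test_iff items hk ap hap x hmem).mp (by simpa using hpx)

-- under the precondition (at most one distinct conflict for this agent) the two lists coincide
theorem pv_conf_eq (items : List (Int × List (Int × Int))) (hk : (items.map Prod.fst).Nodup)
    (ap : Int × List (Int × Int)) (hap : ap ∈ items)
    (hlen : (pvConfA items ap).length ≤ 1) :
    pvConfA items ap = pvConfB items ap :=
  pv_eq_of_le_one _ _ (PySem.Set.nodup_ofList _) (PySem.Set.nodup_ofList _)
    (pv_conf_mem_iff items hk ap hap) hlen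

theorem pv_foldl_and (l : List (Int × List (Int × Int))) (p : (Int × List (Int × Int)) → Bool) (b : Bool) :
    l.foldl (fun b x => b && p x) b = (b && l.all p) := by
  induction l generalizing b with
  | nil => simp
  | cons x t ih => simp [List.foldl_cons, ih, Bool.and_assoc]

theorem pv_all_congr (l : List (Int × List (Int × Int))) (p q : (Int × List (Int × Int)) → Bool)
    (h : ∀ x ∈ l, p x = q x) : l.all p = l.all q := by
  induction l with
  | nil => rfl
  | cons x t ih =>
      simp only [List.all_cons, h x List.mem_cons_self, ih (fun y hy => h y (List.mem_cons_of_mem x hy))]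

-- Port A in closed form
theorem pv_A_eq (paths : List (Int × List (Int × Int))) :
    is_conflict_free paths
      = (((PySem.Dict.ofList paths : PySem.Dict Int (List (Int × Int))).items.map
            (fun ap => (ap.1, pvConfA (PySem.Dict.ofList paths : PySem.Dict Int (List (Int × Int))).items ap))),
          (PySem.Dict.ofList paths : PySem.Dict Int (List (Int × Int))).items.all
            (fun ap => (pvConfA (PySem.Dict.ofList paths : PySem.Dict Int (List (Int × Int))).items ap).isEmpty)) := by
  simp only [is_conflict_free]
  have hk : ((PySem.Dict.ofList paths : PySem.Dict Int (List (Int × Int))).items.map Prod.fst).Nodup := by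
    simpa [PySem.Dict.keys] using PySem.Dict.nodup_keys_ofList (ps := paths)
  set items := (PySem.Dict.ofList paths : PySem.Dict Int (List (Int × Int))).items with hitems
  have hbody : ∀ (cp : PySem.Dict Int (List (Int × Int))), ∀ ap ∈ items,
      (fun (cp : PySem.Dict Int (List (Int × Int))) (ap : Int × List (Int × Int)) =>
        if ((PySem.List.slice ap.2 (some 1) (some (-1))).foldl (fun ac pos =>
            items.foldl (fun ac bp =>
              if ap.1 ≠ bp.1 ∧ pos ∈ PySem.List.slice bp.2 none (some (-1)) then
                PySem.Set.add ac pos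
              else ac) ac)
            PySem.Set.empty) ≠ [] then
          cp.insert ap.1 ((PySem.List.slice ap.2 (some 1) (some (-1))).foldl (fun ac pos =>
            items.foldl (fun ac bp =>
              if ap.1 ≠ bp.1 ∧ pos ∈ PySem.List.slice bp.2 none (some (-1)) then
                PySem.Set.add ac pos
              else ac) ac)
            PySem.Set.empty)
        else cp.insert ap.1 []) cp ap
      = (fun (cp : PySem.Dict Int (List (Int × Int))) (ap : Int × List (Int × Int)) =>
          cp.insert ap.1 (pvConfA items ap)) cp ap := by
    intro cp ap _
    simp only []
    have hS : (PySem.List.slice ap.2 (some 1) (some (-1))).foldl (fun ac pos =>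
          items.foldl (fun ac bp =>
            if ap.1 ≠ bp.1 ∧ pos ∈ PySem.List.slice bp.2 none (some (-1)) then
              PySem.Set.add ac pos
            else ac) ac)
          PySem.Set.empty = pvConfA items ap := by
      have hf : (fun (ac : PySem.Set (Int × Int)) pos =>
          items.foldl (fun ac bp =>
            if ap.1 ≠ bp.1 ∧ pos ∈ PySem.List.slice bp.2 none (some (-1)) then
              PySem.Set.add ac pos
            else ac) ac)
          = fun ac pos =>
            if items.any (fun bp => decide (ap.1 ≠ bp.1 ∧ pos ∈ PySem.List.slice bp.2 none (some (-1)))) then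
              PySem.Set.add ac pos
            else ac := by
        funext ac pos; exact pv_foldl_any items ap.1 ac pos
      rw [hf]
      exact pv_foldl_add_filter _ _
    rw [hS]
    by_cases h : pvConfA items ap = []
    · simp [h]
    · simp [h]
  simp only [PySem.Dict.values]
  rw [PySem.List.foldl_congr_mem items _ _ PySem.Dict.empty hbody,
    PySem.Dict.items_foldl_insert_fresh items Prod.fst (fun ap => pvConfA items ap)
      PySem.Dict.empty (fun a _ => PySem.Dict.contains_empty a.1) hk]
  have hemp : (PySem.Dict.empty : PySem.Dict Int (List (Int × Int))).items = [] := rfl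
  simp [hemp, List.all_map, Function.comp_def]

-- Port B in closed form
theorem pv_B_eq (paths : List (Int × List (Int × Int))) :
    is_conflict_free_alt paths
      = (((PySem.Dict.ofList paths : PySem.Dict Int (List (Int × Int))).items.map
            (fun ap => (ap.1, pvConfB (PySem.Dict.ofList paths : PySem.Dict Int (List (Int × Int))).items ap))),
          (PySem.Dict.ofList paths : PySem.Dict Int (List (Int × Int))).items.all
            (fun ap => (pvConfB (PySem.Dict.ofList paths : PySem.Dict Int (List (Int × Int))).items ap).isEmpty)) := by
  simp only [is_conflict_free_alt]
  have hk : ((PySem.Dict.ofList paths : PySem.Dict Int (List (Int × Int))).items.map Prod.fst).Nodup := by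
    simpa [PySem.Dict.keys] using PySem.Dict.nodup_keys_ofList (ps := paths)
  set items := (PySem.Dict.ofList paths : PySem.Dict Int (List (Int × Int))).items with hitems
  set owners := items.foldl (fun o ap =>
      (PySem.Set.ofList (PySem.List.slice ap.2 none (some (-1)))).foldl
        (fun o pos => o.insert pos (o.getD pos 0 + 1)) o) (PySem.Dict.empty : PySem.Dict (Int × Int) Int)
    with howners
  have hconf : ∀ ap : Int × List (Int × Int),
      (PySem.List.slice ap.2 (some 1) (some (-1))).foldl (fun cs pos =>
          if owners.getD pos 0 > 1 ∧ pos ∉ cs then cs ++ [pos] else cs) []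
        = pvConfB items ap := by
    intro ap
    rw [pv_dedup_append _ (fun pos => owners.getD pos 0 > 1)]
    have hfun : (fun (cs : PySem.Set (Int × Int)) (pos : Int × Int) =>
          if owners.getD pos 0 > 1 then PySem.Set.add cs pos else cs)
        = fun cs pos =>
            if (fun (pos : Int × Int) => decide (1 < items.countP
                (fun bp => decide (pos ∈ PySem.List.slice bp.2 none (some (-1)))))) pos then
              PySem.Set.add cs pos
            else cs := by
      funext cs pos
      have hiff : (owners.getD pos 0 > 1)
          ↔ (decide (1 < items.countP
              (fun bp => decide (pos ∈ PySem.List.slice bp.2 none (some (-1))))) = true) := by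
        rw [howners, pv_owners_getD]
        simp [PySem.Dict.getD_empty]
      exact if_congr hiff rfl rfl
    rw [hfun, pv_foldl_add_filter]
    rfl
  have hbody : ∀ (st : PySem.Dict Int (List (Int × Int)) × Bool), ∀ ap ∈ items,
      (fun (st : PySem.Dict Int (List (Int × Int)) × Bool) (ap : Int × List (Int × Int)) =>
        (st.1.insert ap.1 ((PySem.List.slice ap.2 (some 1) (some (-1))).foldl (fun cs pos =>
            if owners.getD pos 0 > 1 ∧ pos ∉ cs then cs ++ [pos] else cs) []),
          st.2 && ((PySem.List.slice ap.2 (some 1) (some (-1))).foldl (fun cs pos =>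
            if owners.getD pos 0 > 1 ∧ pos ∉ cs then cs ++ [pos] else cs) []).isEmpty)) st ap
      = (fun (st : PySem.Dict Int (List (Int × Int)) × Bool) (ap : Int × List (Int × Int)) =>
          ((fun (d : PySem.Dict Int (List (Int × Int))) (ap : Int × List (Int × Int)) =>
              d.insert ap.1 (pvConfB items ap)) st.1 ap,
           (fun (b : Bool) (ap : Int × List (Int × Int)) =>
              b && (pvConfB items ap).isEmpty) st.2 ap)) st ap := by
    intro st ap _
    simp only []
    rw [hconf ap]
  rw [PySem.List.foldl_congr_mem items _ _ (PySem.Dict.empty, true) hbody,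
    PySem.List.foldl_prod_mk
      (f := fun (d : PySem.Dict Int (List (Int × Int))) (ap : Int × List (Int × Int)) =>
        d.insert ap.1 (pvConfB items ap))
      (g := fun (b : Bool) (ap : Int × List (Int × Int)) => b && (pvConfB items ap).isEmpty),
    PySem.Dict.items_foldl_insert_fresh items Prod.fst (fun ap => pvConfB items ap)
      PySem.Dict.empty (fun a _ => PySem.Dict.contains_empty a.1) hk,
    pv_foldl_and]
  have hemp : (PySem.Dict.empty : PySem.Dict Int (List (Int × Int))).items = [] := rfl
  simp [hemp]

-- ===== VERDICT (by name: the statement is the Claim_ definition above) =====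
theorem is_conflict_free_spec : Claim_equal_is_conflict_free := by
  intro paths _ hpre
  unfold Spec_is_conflict_free
  rw [pv_A_eq, pv_B_eq]
  have hk : ((PySem.Dict.ofList paths : PySem.Dict Int (List (Int × Int))).items.map Prod.fst).Nodup := by
    simpa [PySem.Dict.keys] using PySem.Dict.nodup_keys_ofList (ps := paths)
  have hlen : ∀ ap ∈ (PySem.Dict.ofList paths : PySem.Dict Int (List (Int × Int))).items,
      (pvConfA (PySem.Dict.ofList paths : PySem.Dict Int (List (Int × Int))).items ap).length ≤ 1 := by
    intro ap hap
    have := hpre ap hap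
    simpa [pvConfA, PySem.List.dedup_eq_ofList] using this
  refine Prod.ext ?_ ?_
  · exact List.map_congr_left (fun ap hap => by rw [pv_conf_eq _ hk ap hap (hlen ap hap)])
  · exact pv_all_congr _ _ _ (fun ap hap => by rw [pv_conf_eq _ hk ap hap (hlen ap hap)])
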